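-- pv_equiv track=rewrite | github.com/posl/comment_recommendation | script/split_gen/5_time/zh/181_C/1.py | is_line
-- ===== SOURCE A (Python) =====
-- def is_line(points):
--     if len(points) < 3:
--         return False
--     else:
--         for i in range(len(points)):
--             for j in range(i+1, len(points)):
--                 for k in range(j+1, len(points)):
--                     if points[i][0] == points[j][0] == points[k][0] or points[i][1] == points[j][1] == points[k][1]:
--                         return True
--         return False
-- ===== SOURCE B (Python) =====
-- def is_line(points):
--     xc = {}
--     yc = {}
--     for x, y in points:
--         xc[x] = xc.get(x, 0) + 1
--         yc[y] = yc.get(y, 0) + 1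
--     return any(v >= 3 for v in xc.values()) or any(v >= 3 for v in yc.values())
-- ===== Notes on version B (the rewrite author's own statement) =====
-- stated objective: faster
-- what changed: replaces the cubic scan over all index triples by a single pass building x- and y-coordinate frequency dictionaries, returning True iff some coordinate occurs at least 3 times
import Mathlib
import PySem

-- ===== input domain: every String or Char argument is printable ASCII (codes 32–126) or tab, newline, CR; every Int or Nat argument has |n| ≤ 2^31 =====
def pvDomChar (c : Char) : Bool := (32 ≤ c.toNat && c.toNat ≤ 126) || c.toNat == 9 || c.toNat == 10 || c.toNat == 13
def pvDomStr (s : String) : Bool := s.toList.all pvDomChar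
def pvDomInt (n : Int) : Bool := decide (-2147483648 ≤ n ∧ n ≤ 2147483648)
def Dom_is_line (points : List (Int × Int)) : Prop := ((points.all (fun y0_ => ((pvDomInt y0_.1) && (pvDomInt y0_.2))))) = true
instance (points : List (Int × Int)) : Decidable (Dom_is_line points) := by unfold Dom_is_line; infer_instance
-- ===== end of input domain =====

-- B replaces A's cubic scan over all index triples by one pass building x/y frequency dictionaries (True iff some coordinate count ≥ 3).

-- ===== PORT A =====
-- literal transliteration of the triple loop; indices drawn from the ranges are always in range, so pyGetD's default is unreachable
def is_line (points : List (Int × Int)) : Bool :=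
  if PySem.List.len points < 3 then false
  else
    (PySem.List.pyRange 0 (PySem.List.len points) 1).any (fun i =>
      (PySem.List.pyRange (i + 1) (PySem.List.len points) 1).any (fun j =>
        (PySem.List.pyRange (j + 1) (PySem.List.len points) 1).any (fun k =>
          let pi := PySem.List.pyGetD points i (0, 0)
          let pj := PySem.List.pyGetD points j (0, 0)
          let pk := PySem.List.pyGetD points k (0, 0)
          (pi.1 == pj.1 && pj.1 == pk.1) || (pi.2 == pj.2 && pj.2 == pk.2))))

-- ===== PORT B =====
def is_line_alt (points : List (Int × Int)) : Bool :=
  let xc := points.foldl (fun d p => d.insert p.1 (d.getD p.1 0 + 1)) (PySem.Dict.empty : PySem.Dict Int Int)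
  let yc := points.foldl (fun d p => d.insert p.2 (d.getD p.2 0 + 1)) (PySem.Dict.empty : PySem.Dict Int Int)
  (xc.values.any (fun v => decide (3 ≤ v))) || (yc.values.any (fun v => decide (3 ≤ v)))

-- ===== PRECONDITION & SPEC =====
def Spec_is_line (points : List (Int × Int)) (out : Bool) : Prop := out = is_line_alt points
instance (points : List (Int × Int)) (out : Bool) : Decidable (Spec_is_line points out) := by unfold Spec_is_line; infer_instance

-- ===== CLAIM (what is proved, stated in full; the proofs are below) =====
def Claim_equal_is_line : Prop := ∀ (points : List (Int × Int)), Dom_is_line points → Spec_is_line points (is_line points)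

-- ===== LEMMAS AND PROOFS =====

-- "some value occurs at least three times in l"
def has3 (l : List Int) : Prop := ∃ v ∈ l, 3 ≤ l.count v

-- "three increasing positions of l carry the same value"
def tri (l : List Int) : Prop :=
  ∃ i j k : Nat, i < j ∧ j < k ∧ k < l.length ∧ l.getD i 0 = l.getD j 0 ∧ l.getD j 0 = l.getD k 0

lemma self_eq_map_range (l : List Int) : l = (List.range l.length).map (fun i => l.getD i 0) := by
  apply List.ext_getElem (by simp)
  intro i h1 h2
  simp [List.getD_eq_getElem?_getD, List.getElem?_eq_getElem h1]

lemma count_eq_filter_length (l : List Int) (v : Int) :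
    l.count v = ((List.range l.length).filter (fun i => l.getD i 0 = v)).length := by
  conv_lhs => rw [self_eq_map_range l]
  rw [List.count_eq_countP, List.countP_map, List.countP_eq_length_filter]
  congr 1

lemma three_le_length {F : List Nat} (hnd : F.Nodup) {i j k : Nat}
    (him : i ∈ F) (hjm : j ∈ F) (hkm : k ∈ F)
    (hij : i ≠ j) (hjk : j ≠ k) (hik : i ≠ k) : 3 ≤ F.length := by
  have hsub : ({i, j, k} : Finset Nat) ⊆ F.toFinset := by
    intro x hx
    simp only [Finset.mem_insert, Finset.mem_singleton] at hx
    rcases hx with rfl | rfl | rfl <;> simpa using ‹_ ∈ F›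
  have hcard : ({i, j, k} : Finset Nat).card = 3 := by
    rw [Finset.card_insert_of_notMem (by simp [hij, hik]),
        Finset.card_insert_of_notMem (by simp [hjk]), Finset.card_singleton]
  have := Finset.card_le_card hsub
  rwa [hcard, List.toFinset_card_of_nodup hnd] at this

lemma tri_iff_has3 (l : List Int) : tri l ↔ has3 l := by
  constructor
  · rintro ⟨i, j, k, hij, hjk, hk, hv1, hv2⟩
    have hi : i < l.length := by omega
    have hj : j < l.length := by omega
    refine ⟨l.getD i 0, ?_, ?_⟩
    · rw [List.getD_eq_getElem l 0 hi]; exact List.getElem_mem hi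
    · rw [count_eq_filter_length]
      have him : i ∈ (List.range l.length).filter (fun i' => l.getD i' 0 = l.getD i 0) := by
        rw [List.mem_filter, List.mem_range]; exact ⟨hi, decide_eq_true rfl⟩
      have hjm : j ∈ (List.range l.length).filter (fun i' => l.getD i' 0 = l.getD i 0) := by
        rw [List.mem_filter, List.mem_range]; exact ⟨hj, decide_eq_true hv1.symm⟩
      have hkm : k ∈ (List.range l.length).filter (fun i' => l.getD i' 0 = l.getD i 0) := by
        rw [List.mem_filter, List.mem_range]
        exact ⟨hk, decide_eq_true (hv1.trans hv2).symm⟩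
      exact three_le_length (List.Nodup.filter _ List.nodup_range) him hjm hkm
        (by omega) (by omega) (by omega)
  · rintro ⟨v, hv, hc⟩
    rw [count_eq_filter_length] at hc
    set F := (List.range l.length).filter (fun i => l.getD i 0 = v) with hF
    have hsort : F.Pairwise (· < ·) := List.Pairwise.filter _ List.pairwise_lt_range
    have h0 : 0 < F.length := by omega
    have h1 : 1 < F.length := by omega
    have h2 : 2 < F.length := by omega
    have key : ∀ m (hm : m < F.length), F[m] < l.length ∧ l.getD F[m] 0 = v := by
      intro m hm
      have := List.getElem_mem hm
      simp only [hF, List.mem_filter, List.mem_range, decide_eq_true_eq] at this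
      exact this
    have hlt := List.pairwise_iff_getElem.mp hsort
    refine ⟨F[0], F[1], F[2], hlt 0 1 h0 h1 (by omega), hlt 1 2 h1 h2 (by omega),
      (key 2 h2).1, ?_, ?_⟩
    · rw [(key 0 h0).2, (key 1 h1).2]
    · rw [(key 1 h1).2, (key 2 h2).2]

lemma proj_getD_fst (points : List (Int × Int)) {a : Nat} (h : a < points.length) :
    (points.map Prod.fst).getD a 0 = (points.getD a ((0 : Int), (0 : Int))).1 := by
  rw [List.getD_eq_getElem _ _ (by simpa using h), List.getD_eq_getElem _ _ h, List.getElem_map]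

lemma proj_getD_snd (points : List (Int × Int)) {a : Nat} (h : a < points.length) :
    (points.map Prod.snd).getD a 0 = (points.getD a ((0 : Int), (0 : Int))).2 := by
  rw [List.getD_eq_getElem _ _ (by simpa using h), List.getD_eq_getElem _ _ h, List.getElem_map]

lemma A_char (points : List (Int × Int)) :
    is_line points = true ↔ tri (points.map Prod.fst) ∨ tri (points.map Prod.snd) := by
  unfold is_line
  by_cases hn : PySem.List.len points < 3
  · rw [if_pos hn]
    simp only [PySem.List.len_eq] at hn
    simp only [Bool.false_eq_true, false_iff]
    rintro (⟨i, j, k, hij, hjk, hk, -, -⟩ | ⟨i, j, k, hij, hjk, hk, -, -⟩) <;>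
      (simp only [List.length_map] at hk; omega)
  · rw [if_neg hn]
    simp only [PySem.List.len_eq] at hn ⊢
    simp only [List.any_eq_true, PySem.List.mem_pyRange_one, Bool.or_eq_true,
      Bool.and_eq_true, beq_iff_eq]
    constructor
    · rintro ⟨i, ⟨hi0, hi⟩, j, ⟨hj0, hj⟩, k, ⟨hk0, hk⟩, hcond⟩
      have hi0' : (0 : Int) ≤ i := hi0
      have hj0' : (0 : Int) ≤ j := by omega
      have hk0' : (0 : Int) ≤ k := by omega
      have ha : i.toNat < points.length := by omega
      have hb : j.toNat < points.length := by omega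
      have hc : k.toNat < points.length := by omega
      have ei : PySem.List.pyGetD points i ((0 : Int), (0 : Int)) = points.getD i.toNat ((0 : Int), (0 : Int)) := by
        rw [PySem.List.pyGetD_eq_getElem points ((0 : Int), (0 : Int)) hi0' (by simpa using hi), List.getD_eq_getElem _ _ ha]
      have ej : PySem.List.pyGetD points j ((0 : Int), (0 : Int)) = points.getD j.toNat ((0 : Int), (0 : Int)) := by
        rw [PySem.List.pyGetD_eq_getElem points ((0 : Int), (0 : Int)) hj0' (by simpa using hj), List.getD_eq_getElem _ _ hb]
      have ek : PySem.List.pyGetD points k ((0 : Int), (0 : Int)) = points.getD k.toNat ((0 : Int), (0 : Int)) := by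
        rw [PySem.List.pyGetD_eq_getElem points ((0 : Int), (0 : Int)) hk0' (by simpa using hk), List.getD_eq_getElem _ _ hc]
      rw [ei, ej, ek] at hcond
      rcases hcond with ⟨h1, h2⟩ | ⟨h1, h2⟩
      · exact Or.inl ⟨i.toNat, j.toNat, k.toNat, by omega, by omega, by simpa using hc,
          by rw [proj_getD_fst _ ha, proj_getD_fst _ hb]; exact h1,
          by rw [proj_getD_fst _ hb, proj_getD_fst _ hc]; exact h2⟩
      · exact Or.inr ⟨i.toNat, j.toNat, k.toNat, by omega, by omega, by simpa using hc,
          by rw [proj_getD_snd _ ha, proj_getD_snd _ hb]; exact h1,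
          by rw [proj_getD_snd _ hb, proj_getD_snd _ hc]; exact h2⟩
    · have build : ∀ (i j k : Nat), i < j → j < k → k < points.length →
          ∀ P : (Int × Int) → (Int × Int) → (Int × Int) → Prop,
          P (points.getD i ((0:Int),(0:Int))) (points.getD j ((0:Int),(0:Int))) (points.getD k ((0:Int),(0:Int))) →
          ∃ i' : Int, (0 ≤ i' ∧ i' < (points.length : Int)) ∧ ∃ j' : Int, (i' + 1 ≤ j' ∧ j' < (points.length : Int)) ∧
            ∃ k' : Int, (j' + 1 ≤ k' ∧ k' < (points.length : Int)) ∧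
            P (PySem.List.pyGetD points i' ((0:Int),(0:Int))) (PySem.List.pyGetD points j' ((0:Int),(0:Int)))
              (PySem.List.pyGetD points k' ((0:Int),(0:Int))) := by
        intro i j k hij hjk hk P hP
        refine ⟨(i : Int), ⟨by omega, by omega⟩, (j : Int), ⟨by omega, by omega⟩,
          (k : Int), ⟨by omega, by omega⟩, ?_⟩
        rw [PySem.List.pyGetD_natCast, PySem.List.pyGetD_natCast, PySem.List.pyGetD_natCast]
        exact hP
      rintro (⟨i, j, k, hij, hjk, hk, h1, h2⟩ | ⟨i, j, k, hij, hjk, hk, h1, h2⟩)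
      · simp only [List.length_map] at hk
        rw [proj_getD_fst _ (by omega), proj_getD_fst _ (by omega)] at h1
        rw [proj_getD_fst _ (by omega), proj_getD_fst _ hk] at h2
        exact build i j k hij hjk hk
          (fun a b c => (a.1 = b.1 ∧ b.1 = c.1) ∨ (a.2 = b.2 ∧ b.2 = c.2)) (Or.inl ⟨h1, h2⟩)
      · simp only [List.length_map] at hk
        rw [proj_getD_snd _ (by omega), proj_getD_snd _ (by omega)] at h1
        rw [proj_getD_snd _ (by omega), proj_getD_snd _ hk] at h2
        exact build i j k hij hjk hk
          (fun a b c => (a.1 = b.1 ∧ b.1 = c.1) ∨ (a.2 = b.2 ∧ b.2 = c.2)) (Or.inr ⟨h1, h2⟩)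

lemma counter_values_any (xs : List Int) :
    ((xs.foldl (fun d x => d.insert x (d.getD x 0 + 1))
        (PySem.Dict.empty : PySem.Dict Int Int)).values.any (fun v => decide (3 ≤ v))) = true
      ↔ has3 xs := by
  rw [PySem.Dict.foldl_insert_getD_add_one_eq_counter]
  rw [show (PySem.Dict.counter xs).values = (PySem.Dict.counter xs).items.map (·.2) from rfl,
    PySem.Dict.items_counter, List.map_map]
  simp only [List.any_map, List.any_eq_true, Function.comp, decide_eq_true_eq, has3,
    PySem.Set.mem_ofList]
  constructor
  · rintro ⟨v, hv, hc⟩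
    exact ⟨v, hv, by exact_mod_cast hc⟩
  · rintro ⟨v, hv, hc⟩
    exact ⟨v, hv, by exact_mod_cast hc⟩

lemma B_char (points : List (Int × Int)) :
    is_line_alt points = true ↔ has3 (points.map Prod.fst) ∨ has3 (points.map Prod.snd) := by
  unfold is_line_alt
  rw [show points.foldl (fun d p => d.insert p.1 (d.getD p.1 0 + 1))
        (PySem.Dict.empty : PySem.Dict Int Int)
      = (points.map Prod.fst).foldl (fun d x => d.insert x (d.getD x 0 + 1))
        (PySem.Dict.empty : PySem.Dict Int Int) from
      by rw [List.foldl_map],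
    show points.foldl (fun d p => d.insert p.2 (d.getD p.2 0 + 1))
        (PySem.Dict.empty : PySem.Dict Int Int)
      = (points.map Prod.snd).foldl (fun d x => d.insert x (d.getD x 0 + 1))
        (PySem.Dict.empty : PySem.Dict Int Int) from
      by rw [List.foldl_map]]
  rw [Bool.or_eq_true, counter_values_any, counter_values_any]

-- ===== VERDICT (by name: the statement is the Claim_ definition above) =====
theorem is_line_spec : Claim_equal_is_line := by
  intro points _
  unfold Spec_is_line
  have h := (A_char points).trans (by rw [tri_iff_has3, tri_iff_has3])
  have h' := B_char points
  cases hA : is_line points <;> cases hB : is_line_alt points <;> simp_all
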